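-- pv_equiv track=rewrite | github.com/YutoMinami/wesmo_map | scripts/update_chains_master.py | index_latest_rows
-- ===== SOURCE A (Python) =====
-- from collections import defaultdict
--
-- def index_latest_rows(
--     rows: list[dict[str, str]], aliases: dict[str, str]
-- ) -> dict[str, dict[str, str]]:
--     """Index latest Smart Code rows by canonical chain name.
--
--     Args:
--         rows: Latest snapshot rows.
--         aliases: Chain-name alias mapping.
--
--     Returns:
--         Latest rows keyed by canonical chain name.
--     """
--     grouped: dict[str, list[dict[str, str]]] = defaultdict(list)
--     for row in rows:
--         chain_name = canonical_chain_name(row["chain_name"].strip(), aliases)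
--         if not chain_name:
--             continue
--         grouped[chain_name].append(row)
--
--     indexed: dict[str, dict[str, str]] = {}
--     for chain_name, grouped_rows in grouped.items():
--         indexed[chain_name] = grouped_rows[0]
--     return indexed
--
-- def canonical_chain_name(chain_name: str, aliases: dict[str, str]) -> str:
--     """Return the canonical name for a chain.
--
--     Args:
--         chain_name: Raw chain name.
--         aliases: Alias mapping.
--
--     Returns:
--         Canonical chain name.
--     """
--     return aliases.get(chain_name, chain_name)
-- ===== SOURCE B (Python) =====
-- def index_latest_rows(
--     rows: list[dict[str, str]], aliases: dict[str, str]
-- ) -> dict[str, dict[str, str]]: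
--     """Index latest Smart Code rows by canonical chain name (single pass, first row wins)."""
--     indexed: dict[str, dict[str, str]] = {}
--     for row in rows:
--         raw = row["chain_name"].strip()
--         chain_name = aliases.get(raw, raw)
--         if chain_name and chain_name not in indexed:
--             indexed[chain_name] = row
--     return indexed
-- ===== Notes on version B (the rewrite author's own statement) =====
-- stated objective: simpler
-- what changed: Replaces the two-phase defaultdict grouping (collect every row per canonical name, then project each group's first element) by a single pass that keeps only the first row seen per canonical name in one dict, with no intermediate per-key lists.
import Mathlib
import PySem

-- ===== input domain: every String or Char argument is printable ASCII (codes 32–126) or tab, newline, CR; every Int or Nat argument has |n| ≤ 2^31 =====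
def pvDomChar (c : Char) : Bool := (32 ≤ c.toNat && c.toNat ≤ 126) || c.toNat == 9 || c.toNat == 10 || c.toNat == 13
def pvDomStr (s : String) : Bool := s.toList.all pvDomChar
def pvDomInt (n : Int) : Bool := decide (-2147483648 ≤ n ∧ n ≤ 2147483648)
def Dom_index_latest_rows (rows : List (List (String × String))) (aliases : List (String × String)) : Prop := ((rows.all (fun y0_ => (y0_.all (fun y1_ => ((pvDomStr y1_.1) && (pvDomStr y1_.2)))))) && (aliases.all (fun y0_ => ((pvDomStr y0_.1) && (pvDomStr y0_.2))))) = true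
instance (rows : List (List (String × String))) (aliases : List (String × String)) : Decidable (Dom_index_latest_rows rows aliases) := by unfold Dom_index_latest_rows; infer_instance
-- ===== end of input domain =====

-- B replaces A's two-phase defaultdict grouping + first-element projection by one pass that
-- keeps only the first row per canonical name (objective: simpler; return values are equal).

-- ===== PORT A =====
-- aliases.get(chain_name, chain_name)
def canonical_chain_name (chain_name : String) (aliases : List (String × String)) : String :=
  (PySem.Dict.mk aliases).getD chain_name chain_name

def index_latest_rows (rows : List (List (String × String))) (aliases : List (String × String)) : List (String × List (String × String)) :=
  -- grouped: defaultdict(list); row["chain_name"] raises KeyError when absent (excluded by Pre_;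
  -- the .getD "" default is never reached inside Pre_)
  -- second loop projects each group's first element: indexed[chain_name] = grouped_rows[0]
  -- (groups are never empty, so pyGet? is some)
  ((rows.foldl (fun g row =>
      let chain_name := canonical_chain_name (PySem.Str.strip (((PySem.Dict.mk row).get? "chain_name").getD "")) aliases
      if chain_name = "" then g
      else g.modify chain_name [] (fun rs => rs ++ [row]))
    (PySem.Dict.empty : PySem.Dict String (List (List (String × String))))).items.foldl
    (fun idx p => idx.insert p.1 ((PySem.List.pyGet? p.2 0).getD []))
    (PySem.Dict.empty : PySem.Dict String (List (String × String)))).items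

-- ===== PORT B =====
def index_latest_rows_alt (rows : List (List (String × String))) (aliases : List (String × String)) : List (String × List (String × String)) :=
  (rows.foldl (fun idx row =>
      let raw := PySem.Str.strip (((PySem.Dict.mk row).get? "chain_name").getD "")
      let chain_name := (PySem.Dict.mk aliases).getD raw raw
      if (!(chain_name == "") && !(idx.contains chain_name)) then idx.insert chain_name row else idx)
    (PySem.Dict.empty : PySem.Dict String (List (String × String)))).items

-- ===== PRECONDITION & SPEC =====
-- Pre_ excludes exactly the rows without a "chain_name" key, on which Python A raises KeyError.
def Pre_index_latest_rows (rows : List (List (String × String))) (aliases : List (String × String)) : Prop :=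
  rows.all (fun row => row.any (fun p => p.1 == "chain_name")) = true
instance (rows : List (List (String × String))) (aliases : List (String × String)) : Decidable (Pre_index_latest_rows rows aliases) := by unfold Pre_index_latest_rows; infer_instance

def pvWitness_index_latest_rows : (List (List (String × String))) × (List (String × String)) :=
  ([[("chain_name", " eth "), ("v", "1")], [("chain_name", "ETH"), ("v", "2")], [("chain_name", ""), ("v", "3")]],
   [("ETH", "eth")])

def Spec_index_latest_rows (rows : List (List (String × String))) (aliases : List (String × String)) (out : List (String × List (String × String))) : Prop := out = index_latest_rows_alt rows aliases
instance (rows : List (List (String × String))) (aliases : List (String × String)) (out : List (String × List (String × String))) : Decidable (Spec_index_latest_rows rows aliases out) := by unfold Spec_index_latest_rows; infer_instance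

-- ===== CLAIM (what is proved, stated in full; the proofs are below) =====
def Claim_equal_index_latest_rows : Prop := ∀ (rows : List (List (String × String))) (aliases : List (String × String)), Dom_index_latest_rows rows aliases → Pre_index_latest_rows rows aliases → Spec_index_latest_rows rows aliases (index_latest_rows rows aliases)

-- ===== LEMMAS AND PROOFS =====

-- projection A's second loop applies to each group
def pvProj (p : String × List (List (String × String))) : String × List (String × String) :=
  (p.1, (PySem.List.pyGet? p.2 0).getD [])

lemma pv_keys_eq {g : PySem.Dict String (List (List (String × String)))}
    {idx : PySem.Dict String (List (String × String))}
    (hproj : idx.items = g.items.map pvProj) : idx.keys = g.keys := by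
  show idx.items.map Prod.fst = g.items.map Prod.fst
  rw [hproj, List.map_map]
  rfl

lemma pv_contains_eq {g : PySem.Dict String (List (List (String × String)))}
    {idx : PySem.Dict String (List (String × String))}
    (hproj : idx.items = g.items.map pvProj) (k : String) :
    idx.contains k = g.contains k := by
  cases h : g.contains k
  · cases h' : idx.contains k
    · rfl
    · exact absurd ((PySem.Dict.contains_iff_mem_keys g k).mpr
        ((pv_keys_eq hproj) ▸ (PySem.Dict.contains_iff_mem_keys idx k).mp h')) (by simp [h])
  · exact (PySem.Dict.contains_iff_mem_keys idx k).mpr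
      ((pv_keys_eq hproj) ▸ (PySem.Dict.contains_iff_mem_keys g k).mp h)

-- the loop invariant: B's dict is the pvProj-image of A's grouped dict, groups are nonempty, keys unique
lemma pv_inv (aliases : List (String × String)) (l : List (List (String × String)))
    (g : PySem.Dict String (List (List (String × String))))
    (idx : PySem.Dict String (List (String × String)))
    (hproj : idx.items = g.items.map pvProj)
    (hne : ∀ p ∈ g.items, p.2 ≠ [])
    (hnd : g.keys.Nodup) :
    (l.foldl (fun idx row =>
        let raw := PySem.Str.strip (((PySem.Dict.mk row).get? "chain_name").getD "")
        let chain_name := (PySem.Dict.mk aliases).getD raw raw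
        if (!(chain_name == "") && !(idx.contains chain_name)) then idx.insert chain_name row else idx) idx).items
      = (l.foldl (fun g row =>
          let chain_name := canonical_chain_name (PySem.Str.strip (((PySem.Dict.mk row).get? "chain_name").getD "")) aliases
          if chain_name = "" then g
          else g.modify chain_name [] (fun rs => rs ++ [row])) g).items.map pvProj
    ∧ (∀ p ∈ (l.foldl (fun g row =>
          let chain_name := canonical_chain_name (PySem.Str.strip (((PySem.Dict.mk row).get? "chain_name").getD "")) aliases
          if chain_name = "" then g
          else g.modify chain_name [] (fun rs => rs ++ [row])) g).items, p.2 ≠ [])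
    ∧ (l.foldl (fun g row =>
          let chain_name := canonical_chain_name (PySem.Str.strip (((PySem.Dict.mk row).get? "chain_name").getD "")) aliases
          if chain_name = "" then g
          else g.modify chain_name [] (fun rs => rs ++ [row])) g).keys.Nodup := by
  induction l generalizing g idx with
  | nil => exact ⟨hproj, hne, hnd⟩
  | cons row l ih =>
    simp only [List.foldl_cons]
    simp only [canonical_chain_name]
    set s := PySem.Str.strip (((PySem.Dict.mk row).get? "chain_name").getD "") with hs
    set cn := (PySem.Dict.mk aliases).getD s s with hcn
    by_cases hz : cn = ""
    · have hB : (!(cn == "") && !(idx.contains cn)) ≠ true := by simp [hz]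
      rw [if_pos hz, if_neg hB]
      exact ih g idx hproj hne hnd
    · rw [if_neg hz]
      by_cases hct : g.contains cn = true
      · -- existing key: A overwrites in place with old ++ [row]; B leaves idx unchanged
        have hidxct : idx.contains cn = true := (pv_contains_eq hproj cn).trans hct
        have hB : (!(cn == "") && !(idx.contains cn)) ≠ true := by simp [hidxct]
        rw [if_neg hB]
        apply ih
        · -- projected items unchanged
          show idx.items = ((g.modify cn [] (fun rs => rs ++ [row])).items).map pvProj
          rw [PySem.Dict.modify, PySem.Dict.items_insert_of_contains g _ hct, hproj, List.map_map]
          apply List.map_congr_left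
          intro p hp
          by_cases hk : (p.1 == cn) = true
          · have hk' : p.1 = cn := by simpa using hk
            have hpmem : (cn, p.2) ∈ g.items := by rw [← hk']; exact hp
            have hgd : g.getD cn [] = p.2 := PySem.Dict.getD_of_mem_items g hpmem hnd []
            have hpne : p.2 ≠ [] := hne p hp
            simp only [Function.comp, hk, if_pos, pvProj, hgd]
            cases h2 : p.2 with
            | nil => exact absurd h2 hpne
            | cons a t =>
              have hnn : (0:Int) ≤ (t.length : Int) + 1 := by positivity
              norm_num [PySem.List.pyGet?, PySem.List.pyIdx?, hk', hnn]
          · simp [Function.comp, hk]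
        · -- values stay nonempty
          intro p hp
          rw [PySem.Dict.modify, PySem.Dict.items_insert_of_contains g _ hct] at hp
          obtain ⟨q, hq, rfl⟩ := List.mem_map.mp hp
          by_cases hk : (q.1 == cn) = true
          · simp only [hk, if_pos]
            simp
          · simp only [hk]
            simpa using hne q hq
        · -- keys unchanged
          rw [PySem.Dict.keys_modify, PySem.Dict.keys_insert_of_contains g _ hct]
          exact hnd
      · -- fresh key: A appends (cn, [row]); B appends (cn, row)
        have hct' : g.contains cn = false := by simpa using hct
        have hidxct : idx.contains cn = false := (pv_contains_eq hproj cn).trans hct'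
        have hB : (!(cn == "") && !(idx.contains cn)) = true := by simp [hidxct, hz]
        rw [if_pos hB]
        apply ih
        · show (idx.insert cn row).items = ((g.modify cn [] (fun rs => rs ++ [row])).items).map pvProj
          rw [PySem.Dict.items_insert_of_not_contains idx _ hidxct, PySem.Dict.modify,
              PySem.Dict.items_insert_of_not_contains g _ hct', hproj, List.map_append,
              PySem.Dict.getD_of_not_contains g _ hct']
          norm_num [pvProj, PySem.List.pyGet?, PySem.List.pyIdx?]
        · intro p hp
          rw [PySem.Dict.modify, PySem.Dict.items_insert_of_not_contains g _ hct'] at hp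
          rcases List.mem_append.mp hp with h | h
          · exact hne p h
          · simp only [List.mem_singleton] at h
            subst h
            simp [PySem.Dict.getD_of_not_contains g _ hct']
        · rw [PySem.Dict.keys_modify, PySem.Dict.keys_insert_of_not_contains g _ hct']
          refine List.nodup_append.mpr ⟨hnd, List.nodup_singleton _, ?_⟩
          intro a ha b hb
          rw [List.mem_singleton] at hb
          subst hb
          intro h
          rw [h] at ha
          exact absurd ((PySem.Dict.contains_iff_mem_keys g cn).mpr ha) (by simp [hct'])

-- A's second loop over a nodup-keyed dict's items is exactly the pvProj image
lemma pv_pass2 (G : PySem.Dict String (List (List (String × String)))) (hnd : G.keys.Nodup) :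
    (G.items.foldl
      (fun idx p => idx.insert p.1 ((PySem.List.pyGet? p.2 0).getD []))
      (PySem.Dict.empty : PySem.Dict String (List (String × String)))).items
    = G.items.map pvProj := by
  have h := PySem.Dict.items_foldl_insert_fresh G.items
    (fun p : String × List (List (String × String)) => p.1)
    (fun p => (PySem.List.pyGet? p.2 0).getD [])
    (PySem.Dict.empty : PySem.Dict String (List (String × String)))
    (fun a _ => by simp) (by simpa using hnd)
  exact h

-- ===== VERDICT (by name: the statement is the Claim_ definition above) =====
theorem index_latest_rows_spec : Claim_equal_index_latest_rows := by
  intro rows aliases _ _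
  show index_latest_rows rows aliases = index_latest_rows_alt rows aliases
  unfold index_latest_rows index_latest_rows_alt
  obtain ⟨hproj, hne, hnd⟩ := pv_inv aliases rows PySem.Dict.empty PySem.Dict.empty rfl
    (by intro p hp; simp [PySem.Dict.empty] at hp) PySem.Dict.nodup_keys_empty
  rw [hproj]
  exact pv_pass2 _ hnd
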